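-- pv_equiv track=rewrite | github.com/domichung/SQL_project0x1 | python_of_sql/屍體/domi_countclass.py | count
-- ===== SOURCE A (Python) =====
-- def count(a):
--     w = 0
--
--     for i in range(len(a)):
--         for j in range(len(a[i])):
--             if a[i][j] is None:
--                 w=w
--             else:
--                 w+=1
--
--     return w-7
-- ===== SOURCE B (Python) =====
-- def count(a):
--     total = sum(len(row) for row in a)
--     nones = sum(1 for row in a for x in row if x is None)
--     return total - nones - 7
-- ===== Notes on version B (the rewrite author's own statement) =====
-- stated objective: simpler
-- what changed: Replaces the index-based nested increment loop with a count-all-via-len minus count-Nones decomposition in two passes.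
import Mathlib
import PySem

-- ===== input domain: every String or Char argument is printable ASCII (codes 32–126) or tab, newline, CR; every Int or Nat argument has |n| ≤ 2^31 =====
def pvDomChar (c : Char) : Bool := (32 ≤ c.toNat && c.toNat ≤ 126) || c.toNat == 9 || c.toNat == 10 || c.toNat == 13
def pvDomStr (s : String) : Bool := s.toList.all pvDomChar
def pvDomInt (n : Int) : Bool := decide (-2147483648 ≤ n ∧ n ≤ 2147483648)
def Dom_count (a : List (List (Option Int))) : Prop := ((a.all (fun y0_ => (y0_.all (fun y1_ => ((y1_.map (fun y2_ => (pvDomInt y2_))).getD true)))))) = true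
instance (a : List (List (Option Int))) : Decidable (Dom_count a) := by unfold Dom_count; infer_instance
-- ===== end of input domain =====

-- B is a simpler decomposition: total element count (via row lengths) minus the count of Nones, minus 7.

-- ===== PORT A =====
-- the nested for-loops over indices, increment w on non-None, ported as nested folds over the same elements
def count (a : List (List (Option Int))) : Int :=
  (a.foldl (fun w row =>
    row.foldl (fun w x =>
      match x with
      | none => w
      | some _ => w + 1) w) 0) - 7

-- ===== PORT B =====
def count_alt (a : List (List (Option Int))) : Int :=
  let total : Int := (a.map (fun row => (row.length : Int))).sum
  let nones : Int := (a.map (fun row => ((row.filter (fun x => x.isNone)).length : Int))).sum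
  total - nones - 7

-- ===== PRECONDITION & SPEC =====
def Spec_count (a : List (List (Option Int))) (out : Int) : Prop := out = count_alt a
instance (a : List (List (Option Int))) (out : Int) : Decidable (Spec_count a out) := by unfold Spec_count; infer_instance

-- ===== CLAIM (what is proved, stated in full; the proofs are below) =====
def Claim_equal_count : Prop := ∀ (a : List (List (Option Int))), Dom_count a → Spec_count a (count a)

-- ===== LEMMAS AND PROOFS =====
theorem count_row (row : List (Option Int)) (w : Int) :
    row.foldl (fun w x => match x with | none => w | some _ => w + 1) w
      = w + (row.length : Int) - ((row.filter (fun x => x.isNone)).length : Int) := by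
  induction row generalizing w with
  | nil => simp
  | cons x xs ih =>
    cases x <;> simp [List.foldl, ih, List.filter] <;> ring

theorem count_outer (a : List (List (Option Int))) (w : Int) :
    a.foldl (fun w row =>
      row.foldl (fun w x => match x with | none => w | some _ => w + 1) w) w
      = w + (a.map (fun row => (row.length : Int))).sum
          - (a.map (fun row => ((row.filter (fun x => x.isNone)).length : Int))).sum := by
  induction a generalizing w with
  | nil => simp
  | cons r rs ih => rw [List.foldl_cons, ih, count_row]; simp [List.map]; ring

-- ===== VERDICT (by name: the statement is the Claim_ definition above) =====
theorem count_spec : Claim_equal_count := by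
  intro a _
  unfold Spec_count count count_alt
  simp [count_outer]
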